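-- pv_equiv track=rewrite | github.com/Aniketgoyal12/Onlinetest_questions | OLT2/EVEN ODD DIFFERENCE.py | differende_even_odd
-- ===== SOURCE A (Python) =====
-- def differende_even_odd(num1):
--     string_num = str(num1)
--     sum_odd = 0
--     sum_even = 0
--     for i in range(len(string_num)):
--         if i%2 == 0:
--             sum_even += int(string_num[i])
--         else:
--             sum_odd += int(string_num[i])
--     isodd = False
--     difference = sum_even - sum_odd
--     if difference % 2 == 0:
--         isodd = True
--     else:
--         isodd = False
--     return isodd
-- ===== SOURCE B (Python) =====
-- def differende_even_odd(num1):
--     # parity of (sum_even - sum_odd) equals parity of the total digit sum,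
--     # so one accumulator over all characters suffices
--     total = 0
--     for ch in str(num1):
--         total += int(ch)
--     return total % 2 == 0
-- ===== Notes on version B (the rewrite author's own statement) =====
-- stated objective: simpler
-- what changed: B drops the even/odd index branch and the two accumulators: since -x = x (mod 2), parity of sum_even - sum_odd equals parity of the total digit sum, so B keeps one running total over all characters and tests its parity.
import Mathlib
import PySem

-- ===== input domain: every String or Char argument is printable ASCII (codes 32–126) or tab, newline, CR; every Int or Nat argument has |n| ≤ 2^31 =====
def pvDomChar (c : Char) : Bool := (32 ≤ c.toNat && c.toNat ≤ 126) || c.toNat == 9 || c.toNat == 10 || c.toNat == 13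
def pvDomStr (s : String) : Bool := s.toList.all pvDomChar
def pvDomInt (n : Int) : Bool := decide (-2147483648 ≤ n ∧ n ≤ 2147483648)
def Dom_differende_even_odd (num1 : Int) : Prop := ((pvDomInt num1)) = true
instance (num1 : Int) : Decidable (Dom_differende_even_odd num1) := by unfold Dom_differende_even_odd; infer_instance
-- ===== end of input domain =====

-- B replaces A's even/odd index branch and two accumulators by one total digit sum,
-- using that sum_even - sum_odd and sum_even + sum_odd have the same parity (simpler).

-- ===== PORT A =====
-- int(string_num[i]) : the index i is always in range; the char is a digit on Pre_
-- (0 ≤ num1), so ofChars? returns some there and the .getD 0 default is never used.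
def differende_even_odd (num1 : Int) : Bool :=
  let cs := PySem.Int.toChars num1
  let sums := (PySem.List.pyRange 0 (cs.length : Int) 1).foldl
    (fun (acc : Int × Int) i =>
      if PySem.Int.mod i 2 == 0 then
        (acc.1, acc.2 + (PySem.Int.ofChars? [PySem.List.pyGetD cs i ' ']).getD 0)
      else
        (acc.1 + (PySem.Int.ofChars? [PySem.List.pyGetD cs i ' ']).getD 0, acc.2))
    ((0 : Int), (0 : Int))   -- (sum_odd, sum_even)
  let difference := sums.2 - sums.1
  if PySem.Int.mod difference 2 == 0 then true else false

-- ===== PORT B =====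
def differende_even_odd_alt (num1 : Int) : Bool :=
  let total := (PySem.Int.toChars num1).foldl
    (fun t c => t + (PySem.Int.ofChars? [c]).getD 0) 0
  PySem.Int.mod total 2 == 0

-- ===== PRECONDITION & SPEC =====
-- Pre_ excludes negative num1: there str(num1) starts with '-' and int('-') raises
-- ValueError in A (and in B).
def Pre_differende_even_odd (num1 : Int) : Prop := 0 ≤ num1
instance (num1 : Int) : Decidable (Pre_differende_even_odd num1) := by unfold Pre_differende_even_odd; infer_instance
def pvWitness_differende_even_odd : Int := (123)

def Spec_differende_even_odd (num1 : Int) (out : Bool) : Prop := out = differende_even_odd_alt num1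
instance (num1 : Int) (out : Bool) : Decidable (Spec_differende_even_odd num1 out) := by unfold Spec_differende_even_odd; infer_instance

-- ===== CLAIM (what is proved, stated in full; the proofs are below) =====
def Claim_equal_differende_even_odd : Prop := ∀ (num1 : Int), Dom_differende_even_odd num1 → Pre_differende_even_odd num1 → Spec_differende_even_odd num1 (differende_even_odd num1)

-- ===== LEMMAS AND PROOFS =====

-- Invariant: whichever accumulator A's step adds g i to, the parity of
-- (sum_even - sum_odd) tracks the parity of the plain running total, since -v ≡ v (mod 2).
theorem pv_parity_fold (g : Int → Int) (l : List Int) (so se t : Int)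
    (h : (se - so - t) % 2 = 0) :
    ((l.foldl (fun (acc : Int × Int) i =>
        if PySem.Int.mod i 2 == 0 then (acc.1, acc.2 + g i)
        else (acc.1 + g i, acc.2)) (so, se)).2
     - (l.foldl (fun (acc : Int × Int) i =>
        if PySem.Int.mod i 2 == 0 then (acc.1, acc.2 + g i)
        else (acc.1 + g i, acc.2)) (so, se)).1
     - l.foldl (fun t i => t + g i) t) % 2 = 0 := by
  induction l generalizing so se t with
  | nil => simpa using h
  | cons x xs ih =>
    simp only [List.foldl_cons]
    by_cases hx : PySem.Int.mod x 2 == 0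
    · simp only [hx, if_pos]
      exact ih _ _ _ (by omega)
    · simp only [hx, if_neg, Bool.false_eq_true, not_false_iff]
      exact ih _ _ _ (by omega)

lemma pv_mod2_iff (D T : Int) (h : (D - T) % 2 = 0) :
    ((if PySem.Int.mod D 2 == 0 then true else false) : Bool) = (PySem.Int.mod T 2 == 0) := by
  simp only [PySem.Int.mod_eq_emod_of_pos (show (0:Int) < 2 by norm_num)]
  by_cases hD : D % 2 = 0 <;> by_cases hT : T % 2 = 0 <;> simp [hD, hT] <;> omega

-- ===== VERDICT (by name: the statement is the Claim_ definition above) =====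
theorem differende_even_odd_spec : Claim_equal_differende_even_odd := by
  intro num1 _ _
  unfold Spec_differende_even_odd differende_even_odd differende_even_odd_alt
  have hB := PySem.List.foldl_pyRange_zero_pyGetD' (PySem.Int.toChars num1) ' '
      (fun (t : Int) c => t + (PySem.Int.ofChars? [c]).getD 0) 0
  have h := pv_parity_fold
      (fun i => (PySem.Int.ofChars? [PySem.List.pyGetD (PySem.Int.toChars num1) i ' ']).getD 0)
      (PySem.List.pyRange 0 ((PySem.Int.toChars num1).length : Int) 1) 0 0 0 (by norm_num)
  rw [← hB]
  beta_reduce at h ⊢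
  exact pv_mod2_iff _ _ (by simpa using h)
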